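-- pv_equiv track=rewrite | github.com/Nana2929/Sentires | Dataset/etc/3_rake_aspect_ext.py | v2_tokens_alignment
-- ===== SOURCE A (Python) =====
-- from typing import List, Dict, Final, Tuple
-- from typing import List
--
-- def v2_tokens_alignment(sub_seq: List, seq: List) -> List[List[int]]:
--     """ map sub_sequence to sequence (find its best contiguous position)
--     Returns:
--         List[List[int]]: the index of sub_sequence:sequence mapping
--     For multiple occurrences of the subseq,
--     it returns only the last occurrence's token indices
--     eg.
--     x = 'boost time is super fast boost time'
--     y = 'boost time'
--     return: [[0, 5], [1, 6]]
--     """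
--     row = len(sub_seq)
--     col = len(seq)
--     NULL = -100
--
--     alignment_tables = [[0]*(col+1) for _ in range(row+1)]
--
--     result = [[i, 0] for i in range(0, row)]
--
--     for r in range(row-1, -1, -1):
--
--         ali_v, ali_idx = 0, NULL
--
--         for c in range(col-1, -1, -1):
--             if seq[c] == sub_seq[r]:
--                 alignment_tables[r][c] = 1 + alignment_tables[r+1][c+1]
--
--             if alignment_tables[r][c] > ali_v:
--                 ali_v, ali_idx = alignment_tables[r][c], c
--
--         result[r][-1] = ali_idx
--     mapped_idx = [i[-1] for i in result]
--     if NULL in mapped_idx: return None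
--     return mapped_idx
-- ===== SOURCE B (Python) =====
-- def v2_tokens_alignment(sub_seq, seq):
--     """Per-row direct longest-common-prefix scan (no DP table): for each r,
--     pick the rightmost c maximizing the contiguous match length."""
--     def lcp(a, b):
--         n = 0
--         for x, y in zip(a, b):
--             if x != y:
--                 break
--             n += 1
--         return n
--     res = []
--     for r in range(len(sub_seq)):
--         best = None
--         for c in range(len(seq)):
--             l = lcp(sub_seq[r:], seq[c:])
--             if l > 0 and (best is None or l >= best[0]):
--                 best = (l, c)
--         if best is None:
--             return None
--         res.append(best[1])
--     return res
-- ===== Notes on version B (the rewrite author's own statement) =====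
-- stated objective: simpler
-- what changed: Replaces A's (row+1)x(col+1) suffix DP table, reverse scans and NULL-sentinel post-check with a direct longest-common-prefix helper, one forward scan per row keeping the rightmost best index, and an early None return.
import Mathlib
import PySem

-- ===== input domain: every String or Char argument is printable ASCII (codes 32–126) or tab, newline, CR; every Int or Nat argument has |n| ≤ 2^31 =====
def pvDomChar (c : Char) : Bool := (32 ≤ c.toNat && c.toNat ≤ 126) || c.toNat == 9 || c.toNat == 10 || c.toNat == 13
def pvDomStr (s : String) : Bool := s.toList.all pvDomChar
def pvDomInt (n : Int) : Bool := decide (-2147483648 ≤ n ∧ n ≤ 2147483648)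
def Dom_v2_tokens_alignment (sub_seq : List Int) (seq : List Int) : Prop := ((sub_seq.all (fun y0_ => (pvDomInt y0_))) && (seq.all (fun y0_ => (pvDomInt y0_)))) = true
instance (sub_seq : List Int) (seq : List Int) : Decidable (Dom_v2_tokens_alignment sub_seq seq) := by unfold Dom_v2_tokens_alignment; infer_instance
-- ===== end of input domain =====

-- B replaces A's (row+1)×(col+1) DP table and reverse scans by a direct
-- longest-common-prefix helper and one forward scan per row (objective: simpler, not faster).

-- ===== PORT A =====
-- 2D table read t[r][c] / write t[r][c] = v (indices are in range throughout A's loops)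
def pvTget (t : List (List Int)) (r c : Int) : Int :=
  PySem.List.pyGetD (PySem.List.pyGetD t r []) c 0

def pvTset (t : List (List Int)) (r c : Int) (v : Int) : List (List Int) :=
  PySem.List.pySetD t r (PySem.List.pySetD (PySem.List.pyGetD t r []) c v)

-- body of A's inner 'for c in range(col-1, -1, -1)' loop; state = (alignment_tables, ali_v, ali_idx)
def pvInnerStep (sub_seq seq : List Int) (r : Int)
    (s : List (List Int) × Int × Int) (c : Int) : List (List Int) × Int × Int :=
  let tbl := if PySem.List.pyGetD seq c 0 = PySem.List.pyGetD sub_seq r 0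
             then pvTset s.1 r c (1 + pvTget s.1 (r+1) (c+1)) else s.1
  if pvTget tbl r c > s.2.1 then (tbl, pvTget tbl r c, c) else (tbl, s.2.1, s.2.2)

-- body of A's outer 'for r in range(row-1, -1, -1)' loop; state = (alignment_tables, result)
def pvOuterStep (sub_seq seq : List Int)
    (st : List (List Int) × List (List Int)) (r : Int) : List (List Int) × List (List Int) :=
  let col : Int := seq.length
  let inner := (PySem.List.pyRange (col-1) (-1) (-1)).foldl (pvInnerStep sub_seq seq r) (st.1, 0, -100)
  (inner.1, PySem.List.pySetD st.2 r (PySem.List.pySetD (PySem.List.pyGetD st.2 r []) (-1) inner.2.2))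

def v2_tokens_alignment (sub_seq : List Int) (seq : List Int) : Option (List Int) :=
  let row : Int := sub_seq.length
  let col : Int := seq.length
  let NULL : Int := -100
  let alignment_tables : List (List Int) :=
    (PySem.List.pyRange 0 (row+1) 1).map (fun _ => PySem.List.pyRepeat [(0:Int)] (col+1))
  let result : List (List Int) := (PySem.List.pyRange 0 row 1).map (fun i => [i, 0])
  let st := (PySem.List.pyRange (row-1) (-1) (-1)).foldl (pvOuterStep sub_seq seq) (alignment_tables, result)
  let mapped_idx := st.2.map (fun i => PySem.List.pyGetD i (-1) 0)
  if NULL ∈ mapped_idx then none else some mapped_idx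

-- ===== PORT B =====
-- lcp(a, b): length of the longest common prefix (B's zip/break loop as structural recursion)
def pvLcp : List Int → List Int → Int
  | x :: a, y :: b => if x = y then 1 + pvLcp a b else 0
  | _, _ => 0

-- body of B's inner 'for c in range(len(seq))' loop; state = best (None or (length, index))
def pvBestStep (sr seq : List Int) (best : Option (Int × Int)) (c : Int) : Option (Int × Int) :=
  let l := pvLcp sr (PySem.List.slice seq (some c) none)
  match best with
  | none => if l > 0 then some (l, c) else none
  | some b => if l > 0 ∧ l ≥ b.1 then some (l, c) else some b

def pvBestFor (sr seq : List Int) : Option (Int × Int) :=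
  (PySem.List.pyRange 0 seq.length 1).foldl (pvBestStep sr seq) none

-- B's outer loop with its early 'return None', as recursion over the list of row indices
def pvGo (sub_seq seq : List Int) : List Int → Option (List Int)
  | [] => some []
  | r :: rest =>
    match pvBestFor (PySem.List.slice sub_seq (some r) none) seq with
    | none => none
    | some b =>
      match pvGo sub_seq seq rest with
      | none => none
      | some res => some (b.2 :: res)

def v2_tokens_alignment_alt (sub_seq : List Int) (seq : List Int) : Option (List Int) :=
  pvGo sub_seq seq (PySem.List.pyRange 0 sub_seq.length 1)

-- ===== PRECONDITION & SPEC =====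
def Spec_v2_tokens_alignment (sub_seq : List Int) (seq : List Int) (out : Option (List Int)) : Prop := out = v2_tokens_alignment_alt sub_seq seq
instance (sub_seq : List Int) (seq : List Int) (out : Option (List Int)) : Decidable (Spec_v2_tokens_alignment sub_seq seq out) := by unfold Spec_v2_tokens_alignment; infer_instance

-- ===== CLAIM (what is proved, stated in full; the proofs are below) =====
def Claim_equal_v2_tokens_alignment : Prop := ∀ (sub_seq : List Int) (seq : List Int), Dom_v2_tokens_alignment sub_seq seq → Spec_v2_tokens_alignment sub_seq seq (v2_tokens_alignment sub_seq seq)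

-- ===== LEMMAS AND PROOFS =====

-- "rightmost argmax of the positive entries" as a right-fold: the common spec both loops reach
def pvBR : List (Int × Int) → Option (Int × Int)
  | [] => none
  | p :: t =>
    match pvBR t with
    | none => if p.1 > 0 then some p else none
    | some q => if p.1 > q.1 then some p else some q

def pvStepB (b : Option (Int × Int)) (p : Int × Int) : Option (Int × Int) :=
  match b with
  | none => if p.1 > 0 then some p else none
  | some q => if p.1 > 0 ∧ p.1 ≥ q.1 then some p else some q

def pvUnOpt (o : Option (Int × Int)) : Int × Int := o.getD (0, -100)

def pvL (sub_seq seq : List Int) (r c : Nat) : Int := pvLcp (sub_seq.drop r) (seq.drop c)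

def pvPairs (sub_seq seq : List Int) (r m : Nat) : List (Int × Int) :=
  ((List.range seq.length).drop m).map (fun c => (pvL sub_seq seq r c, (c : Int)))

def pvAns (sub_seq seq : List Int) (k : Nat) : Int := (pvUnOpt (pvBR (pvPairs sub_seq seq k 0))).2

def pvTbl (sub_seq seq : List Int) (r m : Nat) : List (List Int) :=
  (List.range (sub_seq.length + 1)).map (fun k =>
    (List.range (seq.length + 1)).map (fun c =>
      if r < k ∨ (k = r ∧ m ≤ c) then pvL sub_seq seq k c else 0))

def pvRes (sub_seq seq : List Int) (r : Nat) : List (List Int) :=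
  (List.range sub_seq.length).map (fun (k : Nat) => [(k : Int), if r ≤ k then pvAns sub_seq seq k else 0])

theorem pvLcp_nil_right (a : List Int) : pvLcp a [] = 0 := by
  cases a <;> simp [pvLcp]

theorem pvL_zero_right (s q : List Int) (r : Nat) : pvL s q r q.length = 0 := by
  simp [pvL, List.drop_length, pvLcp_nil_right]

theorem pvL_zero_left (s q : List Int) (c : Nat) : pvL s q s.length c = 0 := by
  simp [pvL, List.drop_length, pvLcp]

theorem pvL_rec (s q : List Int) (r c : Nat) (hr : r < s.length) (hc : c < q.length) :
    pvL s q r c = if q[c] = s[r] then 1 + pvL s q (r+1) (c+1) else 0 := by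
  unfold pvL
  rw [List.drop_eq_getElem_cons hr, List.drop_eq_getElem_cons hc]
  simp only [pvLcp]
  by_cases h : q[c] = s[r]
  · rw [if_pos h.symm, if_pos h]
  · rw [if_neg (fun hh => h hh.symm), if_neg h]

theorem pvBR_append (t : List (Int × Int)) (p : Int × Int) :
    pvBR (t ++ [p]) = pvStepB (pvBR t) p := by
  induction t with
  | nil => simp [pvBR, pvStepB]
  | cons x t ih =>
    simp only [List.cons_append, pvBR, ih]
    rcases h : pvBR t with _ | qp <;> simp only [h, pvStepB] <;>
      split_ifs <;> simp_all <;>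
      first | rfl | omega | (intro hh; exact absurd hh (by omega)) | (split_ifs <;> first | rfl | omega)

theorem pvBR_mem (l : List (Int × Int)) (b : Int × Int) (h : pvBR l = some b) : b ∈ l := by
  induction l generalizing b with
  | nil => simp [pvBR] at h
  | cons x t ih =>
    simp only [pvBR] at h
    rcases h2 : pvBR t with _ | qp <;> rw [h2] at h <;> split_ifs at h <;>
      first
      | (simp_all; done)
      | (have := ih qp h2; by_cases hq : qp.1 < x.1 <;> simp [hq] at h <;> simp_all)

theorem set_map_range {α : Type} (f : Nat → α) (n k : Nat) (v : α) (hk : k < n) :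
    ((List.range n).map f).set k v = (List.range n).map (fun j => if j = k then v else f j) := by
  apply List.ext_getElem
  · simp
  · intro i h1 h2
    simp only [List.getElem_set, List.getElem_map, List.getElem_range] at *
    by_cases h : i = k <;> simp [h, Ne.symm]

theorem pvPairs_nil (s q : List Int) (r : Nat) : pvPairs s q r q.length = [] := by
  simp [pvPairs]

theorem pvPairs_cons (s q : List Int) (r m : Nat) (hm : m < q.length) :
    pvPairs s q r m = (pvL s q r m, (m : Int)) :: pvPairs s q r (m+1) := by
  unfold pvPairs
  rw [List.drop_eq_getElem_cons (by simpa using hm)]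
  simp

theorem pvTbl_get (s q : List Int) (r m k c : Nat) (hk : k ≤ s.length) (hc : c ≤ q.length) :
    pvTget (pvTbl s q r m) (k : Int) (c : Int)
      = if r < k ∨ (k = r ∧ m ≤ c) then pvL s q k c else 0 := by
  unfold pvTget pvTbl
  simp only [PySem.List.pyGetD_natCast]
  rw [PySem.List.getD_map_range _ _ _ _ (by omega), PySem.List.getD_map_range _ _ _ _ (by omega)]

theorem pvTbl_top (s q : List Int) (r : Nat) : pvTbl s q r q.length = pvTbl s q (r+1) 0 := by
  unfold pvTbl
  refine List.map_congr_left ?_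
  intro k hk
  refine List.map_congr_left ?_
  intro c hc
  simp only [List.mem_range] at hk hc
  by_cases hkr : k = r
  · subst hkr
    by_cases hcq : c = q.length
    · subst hcq
      split_ifs <;> simp [pvL_zero_right] <;> omega
    · split_ifs <;> first | rfl | omega
  · split_ifs <;> first | rfl | omega

theorem pvTset_eq (s q : List Int) (r m : Nat) (hr : r < s.length) (hm : m < q.length) :
    pvTset (pvTbl s q r (m+1)) (r : Int) (m : Int) (pvL s q r m) = pvTbl s q r m := by
  unfold pvTset
  rw [PySem.List.pyGetD_natCast, PySem.List.pySetD_natCast, PySem.List.pySetD_natCast]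
  unfold pvTbl
  rw [PySem.List.getD_map_range _ _ _ _ (by omega), set_map_range _ _ _ _ (by omega),
      set_map_range _ _ _ _ (by omega)]
  refine List.map_congr_left ?_
  intro k hk
  simp only [List.mem_range] at hk
  by_cases hkr : k = r
  · subst hkr
    rw [if_pos rfl]
    refine List.map_congr_left ?_
    intro c hc
    simp only [List.mem_range] at hc
    by_cases hcm : c = m
    · subst hcm
      rw [if_pos rfl, if_pos (by omega)]
    · rw [if_neg hcm]
      split_ifs <;> first | rfl | omega
  · rw [if_neg hkr]
    refine List.map_congr_left ?_
    intro c hc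
    split_ifs <;> first | rfl | omega

theorem pvTbl_unchanged (s q : List Int) (r m : Nat) (h0 : pvL s q r m = 0) :
    pvTbl s q r (m+1) = pvTbl s q r m := by
  unfold pvTbl
  refine List.map_congr_left ?_
  intro k hk
  refine List.map_congr_left ?_
  intro c hc
  by_cases hkr : k = r
  · subst hkr
    by_cases hcm : c = m
    · subst hcm
      split_ifs <;> first | rfl | omega | (rw [h0])
    · split_ifs <;> first | rfl | omega
  · split_ifs <;> first | rfl | omega

theorem pvInnerStep_eq (s q : List Int) (r m : Nat) (hr : r < s.length) (hm : m < q.length) :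
    pvInnerStep s q (r : Int) (pvTbl s q r (m+1), pvUnOpt (pvBR (pvPairs s q r (m+1)))) (m : Int)
      = (pvTbl s q r m, pvUnOpt (pvBR (pvPairs s q r m))) := by
  have hq : PySem.List.pyGetD q (m : Int) 0 = q[m] := by
    rw [PySem.List.pyGetD_natCast, List.getD_eq_getElem _ _ hm]
  have hs : PySem.List.pyGetD s (r : Int) 0 = s[r] := by
    rw [PySem.List.pyGetD_natCast, List.getD_eq_getElem _ _ hr]
  have hread : pvTget (pvTbl s q r (m+1)) ((r : Int)+1) ((m : Int)+1) = pvL s q (r+1) (m+1) := by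
    have := pvTbl_get s q r (m+1) (r+1) (m+1) (by omega) (by omega)
    rw [if_pos (by omega)] at this
    push_cast at this ⊢
    exact this
  have hget : pvTget (pvTbl s q r m) (r : Int) (m : Int) = pvL s q r m := by
    have := pvTbl_get s q r m r m (by omega) (by omega)
    rw [if_pos (by omega)] at this
    exact this
  have htbl : (if PySem.List.pyGetD q (m : Int) 0 = PySem.List.pyGetD s (r : Int) 0
      then pvTset (pvTbl s q r (m+1)) (r : Int) (m : Int)
             (1 + pvTget (pvTbl s q r (m+1)) ((r : Int)+1) ((m : Int)+1))
      else pvTbl s q r (m+1)) = pvTbl s q r m := by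
    rw [hq, hs, hread]
    by_cases hqs : q[m] = s[r]
    · rw [if_pos hqs]
      rw [show 1 + pvL s q (r+1) (m+1) = pvL s q r m from by rw [pvL_rec s q r m hr hm, if_pos hqs]]
      exact pvTset_eq s q r m hr hm
    · rw [if_neg hqs]
      exact pvTbl_unchanged s q r m (by rw [pvL_rec s q r m hr hm, if_neg hqs])
  show (if pvTget _ _ _ > _ then _ else _) = _
  rw [htbl, hget]
  rw [pvPairs_cons s q r m hm]
  rcases hbr : pvBR (pvPairs s q r (m+1)) with _ | qp <;>
    simp only [pvBR, hbr, pvUnOpt, Option.getD] <;> split_ifs <;>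
      first | rfl | omega | (exfalso; omega)

-- the inner loop, columns m-1 .. 0 still to process
theorem pvInner (s q : List Int) (r : Nat) (hr : r < s.length) :
    ∀ m, m ≤ q.length →
    (PySem.List.pyRange ((m : Int) - 1) (-1) (-1)).foldl (pvInnerStep s q (r : Int))
        (pvTbl s q r m, pvUnOpt (pvBR (pvPairs s q r m)))
      = (pvTbl s q r 0, pvUnOpt (pvBR (pvPairs s q r 0))) := by
  intro m
  induction m with
  | zero => intro _; rw [PySem.List.pyRange_neg_one_eq_nil (by omega)]; rfl
  | succ m ih =>
    intro hm
    rw [show ((m+1 : Nat) : Int) - 1 = (m : Int) by push_cast; ring]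
    rw [PySem.List.pyRange_neg_one_cons (by omega)]
    simp only [List.foldl_cons]
    rw [show ((m : Int)) - 1 = ((m : Nat) : Int) - 1 by norm_num]
    rw [pvInnerStep_eq s q r m hr (by omega)]
    exact ih (by omega)

theorem pvSetLast2 (a b v : Int) : PySem.List.pySetD [a, b] (-1) v = [a, v] := by
  simp [PySem.List.pySetD, PySem.List.pySet?, PySem.List.pyIdx?]

theorem pvGetLast2 (a b d : Int) : PySem.List.pyGetD [a, b] (-1) d = b := by
  simp [PySem.List.pyGetD, PySem.List.pyGet?, PySem.List.pyIdx?]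

theorem pvOuterStep_eq (s q : List Int) (r : Nat) (hr : r < s.length) :
    pvOuterStep s q (pvTbl s q (r+1) 0, pvRes s q (r+1)) (r : Int)
      = (pvTbl s q r 0, pvRes s q r) := by
  have hfold : (PySem.List.pyRange ((q.length : Int) - 1) (-1) (-1)).foldl
      (pvInnerStep s q (r : Int)) (pvTbl s q (r+1) 0, ((0 : Int), (-100 : Int)))
      = (pvTbl s q r 0, pvUnOpt (pvBR (pvPairs s q r 0))) := by
    rw [← pvTbl_top s q r]
    rw [show ((0 : Int), (-100 : Int)) = pvUnOpt (pvBR (pvPairs s q r q.length)) from by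
      rw [pvPairs_nil]; rfl]
    exact pvInner s q r hr q.length le_rfl
  have hrow : PySem.List.pyGetD (pvRes s q (r+1)) (r : Int) [] = [(r : Int), 0] := by
    unfold pvRes
    rw [PySem.List.pyGetD_natCast, PySem.List.getD_map_range _ _ _ _ hr, if_neg (by omega)]
  have hset : PySem.List.pySetD (pvRes s q (r+1)) (r : Int) [(r : Int), pvAns s q r]
      = pvRes s q r := by
    unfold pvRes
    rw [PySem.List.pySetD_natCast, set_map_range _ _ _ _ hr]
    refine List.map_congr_left ?_
    intro k hk
    simp only [List.mem_range] at hk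
    by_cases hkr : k = r
    · rw [if_pos hkr, hkr, if_pos (le_refl r)]
    · rw [if_neg hkr]
      split_ifs <;> first | rfl | omega
  unfold pvOuterStep
  simp only []
  rw [hfold, hrow, pvSetLast2]
  rw [show (pvUnOpt (pvBR (pvPairs s q r 0))).2 = pvAns s q r from rfl, hset]

-- the outer loop, rows r-1 .. 0 still to process
theorem pvOuter (s q : List Int) :
    ∀ r, r ≤ s.length →
    (PySem.List.pyRange ((r : Int) - 1) (-1) (-1)).foldl (pvOuterStep s q)
        (pvTbl s q r 0, pvRes s q r)
      = (pvTbl s q 0 0, pvRes s q 0) := by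
  intro r
  induction r with
  | zero => intro _; rw [PySem.List.pyRange_neg_one_eq_nil (by omega)]; rfl
  | succ r ih =>
    intro hrow
    rw [show ((r+1 : Nat) : Int) - 1 = (r : Int) by push_cast; ring]
    rw [PySem.List.pyRange_neg_one_cons (by omega)]
    simp only [List.foldl_cons]
    rw [show ((r : Int)) - 1 = ((r : Nat) : Int) - 1 by norm_num]
    rw [pvOuterStep_eq s q r (by omega)]
    exact ih (by omega)

theorem pvTbl_init (s q : List Int) :
    (PySem.List.pyRange 0 ((s.length : Int) + 1) 1).map
        (fun _ => PySem.List.pyRepeat [(0 : Int)] ((q.length : Int) + 1))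
      = pvTbl s q s.length 0 := by
  rw [show ((s.length : Int) + 1) = ((s.length + 1 : Nat) : Int) by push_cast; ring,
      PySem.List.pyRange_zero_nat, List.map_map]
  unfold pvTbl
  refine List.map_congr_left ?_
  intro k hk
  simp only [List.mem_range] at hk
  rw [show ((q.length : Int) + 1) = ((q.length + 1 : Nat) : Int) by push_cast; ring,
      PySem.List.pyRepeat_singleton, Int.toNat_natCast]
  simp only [Function.comp_apply]
  symm
  rw [List.eq_replicate_iff]
  refine ⟨by simp, ?_⟩
  intro b hb
  simp only [List.mem_map, List.mem_range] at hb
  obtain ⟨c, hc, rfl⟩ := hb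
  split_ifs with hcond
  · rcases hcond with h1 | ⟨h2, _⟩
    · omega
    · rw [h2]; exact pvL_zero_left s q c
  · rfl

theorem pvRes_init (s q : List Int) :
    (PySem.List.pyRange 0 (s.length : Int) 1).map (fun i => [i, 0]) = pvRes s q s.length := by
  rw [PySem.List.pyRange_zero_nat, List.map_map]
  unfold pvRes
  refine List.map_congr_left ?_
  intro k hk
  simp only [List.mem_range] at hk
  simp only [Function.comp]
  rw [if_neg (by omega)]

theorem pvA_char (s q : List Int) :
    v2_tokens_alignment s q
      = if (-100 : Int) ∈ (List.range s.length).map (pvAns s q) then none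
        else some ((List.range s.length).map (pvAns s q)) := by
  unfold v2_tokens_alignment
  simp only []
  rw [pvTbl_init, pvRes_init, pvOuter s q s.length le_rfl]
  have hmap : (pvRes s q 0).map (fun i => PySem.List.pyGetD i (-1) 0)
      = (List.range s.length).map (pvAns s q) := by
    unfold pvRes
    rw [List.map_map]
    refine List.map_congr_left ?_
    intro k _
    simp only [Function.comp]
    rw [if_pos (Nat.zero_le k), pvGetLast2]
  rw [hmap]

theorem foldl_pvStepB (g : Nat → Int × Int) (l : List Nat) :
    l.foldl (fun b c => pvStepB b (g c)) none = pvBR (l.map g) := by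
  induction l using List.reverseRecOn with
  | nil => rfl
  | append_singleton t c ih =>
    rw [List.foldl_append, List.map_append, List.map_singleton, pvBR_append, ih]
    rfl

theorem pvBestFor_eq (s q : List Int) (r : Nat) :
    pvBestFor (s.drop r) q = pvBR (pvPairs s q r 0) := by
  unfold pvBestFor
  rw [PySem.List.pyRange_zero_nat, List.foldl_map]
  have hstep : ∀ (b : Option (Int × Int)) (k : Nat),
      pvBestStep (s.drop r) q b (k : Int) = pvStepB b (pvL s q r k, (k : Int)) := by
    intro b k
    unfold pvBestStep pvStepB pvL
    rw [PySem.List.slice_from_natCast]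
  simp only [hstep]
  rw [foldl_pvStepB]
  rfl

theorem pvGo_char (s q : List Int) (l : List Nat) :
    pvGo s q (l.map (fun k : Nat => (k : Int)))
      = if (-100 : Int) ∈ l.map (pvAns s q) then none else some (l.map (pvAns s q)) := by
  induction l with
  | nil => simp [pvGo]
  | cons k l ih =>
    simp only [List.map_cons]
    rw [pvGo, PySem.List.slice_from_natCast, pvBestFor_eq]
    rcases hb : pvBR (pvPairs s q k 0) with _ | b
    · have hans : pvAns s q k = -100 := by rw [pvAns, hb]; rfl
      simp [hans]
    · have hans : pvAns s q k = b.2 := by rw [pvAns, hb]; rfl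
      have hmem := pvBR_mem _ _ hb
      have hb2 : 0 ≤ b.2 := by
        unfold pvPairs at hmem
        simp only [List.mem_map] at hmem
        obtain ⟨c, _, hc⟩ := hmem
        rw [← hc]
        simp
      rw [ih]
      by_cases hmm : (-100 : Int) ∈ l.map (pvAns s q)
      · simp [hmm, hans]
      · simp [hmm, hans, show ¬ ((-100 : Int) = b.2) from by omega]

theorem pvB_char (s q : List Int) :
    v2_tokens_alignment_alt s q
      = if (-100 : Int) ∈ (List.range s.length).map (pvAns s q) then none
        else some ((List.range s.length).map (pvAns s q)) := by
  unfold v2_tokens_alignment_alt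
  rw [PySem.List.pyRange_zero_nat, pvGo_char]

-- ===== VERDICT (by name: the statement is the Claim_ definition above) =====
theorem v2_tokens_alignment_spec : Claim_equal_v2_tokens_alignment := by
  intro s q _
  unfold Spec_v2_tokens_alignment
  rw [pvA_char, pvB_char]
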